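-- pv_equiv track=rewrite | github.com/d0jyaaan/Projects-2022 | schedule.py | generate
-- ===== SOURCE A (Python) =====
-- def generate(number):
--     """
--     Generate an empty timetable from Monday to Friday
--     """
--     temp_number = int(number/ 5)
--     my_dict = dict()
--
--     days = ["Monday", "Tuesday", "Wednesday", "Thursday", "Friday"]
--
--     # initial assignment
--     for day in days :
--         temp_dict = dict()
--         for i in range(0, temp_number, 1):
--             temp_dict[i] = None
--         my_dict[day] = temp_dict
--
--     # if number of periods is not a multiple of 5
--     limit = (number - (temp_number * 5))
--     if (limit != 0):
--         count = 0
--         for i in my_dict.values():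
--             i[len(i)] = None
--             count += 1
--             if count == limit:
--                 break
--
--     return my_dict
-- ===== SOURCE B (Python) =====
-- def generate(number):
--     """
--     Generate an empty timetable from Monday to Friday
--     """
--     base = int(number / 5)
--     limit = number - base * 5
--     my_dict = {}
--     for index, day in enumerate(["Monday", "Tuesday", "Wednesday", "Thursday", "Friday"]):
--         count = base + 1 if index < limit else base
--         my_dict[day] = {i: None for i in range(count)}
--     return my_dict
-- ===== Notes on version B (the rewrite author's own statement) =====
-- stated objective: simpler
-- what changed: Single pass over the five days computing each day's final period count (base+1 for the first `limit` days) and building each day's dict once, instead of A's two-phase build-uniform-dicts-then-patch-the-first-limit-values loop with a counter and break.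
-- intended difference: On negative numbers not divisible by 5 (limit < 0), A's patch loop's break (count == limit) never fires so A accidentally appends one extra period to every day (e.g. generate(-3) gives every day {0: None}); B adds nothing (every day is empty), the intended value for a non-positive period count. — e.g. on generate(-3): A returns [("Monday", [(0, none)]), ("Tuesday", [(0, none)]), ("Wednesday", [(0, none)]), ("Thursday", [(0, none)]), ("Friday", […, B returns [("Monday", []), ("Tuesday", []), ("Wednesday", []), ("Thursday", []), ("Friday", [])]
import Mathlib
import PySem

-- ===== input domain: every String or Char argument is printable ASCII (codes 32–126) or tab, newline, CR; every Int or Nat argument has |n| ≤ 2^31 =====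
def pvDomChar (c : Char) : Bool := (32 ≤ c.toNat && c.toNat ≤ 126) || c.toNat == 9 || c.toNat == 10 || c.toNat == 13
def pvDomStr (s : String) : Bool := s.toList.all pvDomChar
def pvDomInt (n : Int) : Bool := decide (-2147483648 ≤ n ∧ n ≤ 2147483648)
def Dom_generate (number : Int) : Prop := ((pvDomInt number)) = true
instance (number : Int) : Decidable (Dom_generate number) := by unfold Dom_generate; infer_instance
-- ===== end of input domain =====

-- B replaces A's build-uniform-dicts-then-patch-the-remainder construction with a single pass
-- computing each day's final period count directly (objective: simpler); on negative numbers not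
-- divisible by 5, B returns empty days where A's runaway patch loop adds a period to every day (see D_).

-- ===== PORT A =====
-- the remainder-patch loop: 'for i in my_dict.values(): i[len(i)] = None; count += 1; if count == limit: break'
-- (Python mutates each value dict in place, in insertion order; modelled on the items list)
def pvPatchLoop (limit : Int) : Int → List (String × PySem.Dict Int (Option Int)) →
    List (String × PySem.Dict Int (Option Int))
  | _, [] => []
  | count, (day, d) :: rest =>
      let d' := d.insert (d.size : Int) none       -- i[len(i)] = None
      let count' := count + 1
      if count' = limit then (day, d') :: rest     -- break
      else (day, d') :: pvPatchLoop limit count' rest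

def generate (number : Int) : List (String × List (Int × Option Int)) :=
  -- int(number / 5): float division then truncation; exact trunc-toward-zero on |number| ≤ 2^31
  let temp_number : Int := number.tdiv 5
  let days : List String := ["Monday", "Tuesday", "Wednesday", "Thursday", "Friday"]
  -- initial assignment
  let my_dict : PySem.Dict String (PySem.Dict Int (Option Int)) :=
    days.foldl (fun md day =>
      let temp_dict := (PySem.List.pyRange 0 temp_number 1).foldl
        (fun td i => td.insert i none) PySem.Dict.empty
      md.insert day temp_dict) PySem.Dict.empty
  let limit := number - temp_number * 5
  let my_dict2 := if limit ≠ 0 then PySem.Dict.mk (pvPatchLoop limit 0 my_dict.items) else my_dict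
  my_dict2.items.map (fun p => (p.1, p.2.items))

-- ===== PORT B =====
def generate_alt (number : Int) : List (String × List (Int × Option Int)) :=
  -- int(number / 5): exact trunc-toward-zero on |number| ≤ 2^31
  let base : Int := number.tdiv 5
  let limit := number - base * 5
  let days : List String := ["Monday", "Tuesday", "Wednesday", "Thursday", "Friday"]
  -- '{i: None for i in range(count)}' has distinct keys in order: its items are exactly this map
  ((PySem.List.enumerate days).foldl (fun md p =>
      let count := if (p.1 : Int) < limit then base + 1 else base
      md.insert p.2 ((PySem.List.pyRange 0 count 1).map (fun i => (i, (none : Option Int)))))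
    (PySem.Dict.empty : PySem.Dict String (List (Int × Option Int)))).items

-- ===== PRECONDITION & SPEC =====
-- On negative numbers not divisible by 5 A's patch loop's break (count == limit < 0) never
-- fires, so A accidentally adds one extra period to every day; B adds nothing (every day
-- empty), the intended value for a non-positive period count.
def D_generate (number : Int) : Prop := number < 0 ∧ ¬ (5 ∣ number)
instance (number : Int) : Decidable (D_generate number) := by unfold D_generate; infer_instance

def Spec_generate (number : Int) (out : List (String × List (Int × Option Int))) : Prop :=
  ¬ D_generate number → out = generate_alt number
instance (number : Int) (out : List (String × List (Int × Option Int))) : Decidable (Spec_generate number out) := by unfold Spec_generate; infer_instance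

def pvDiffWitness_generate : Int := -3
def pvDiffWitnessOut_generate : (List (String × List (Int × Option Int))) × (List (String × List (Int × Option Int))) :=
  ([("Monday", [(0, none)]), ("Tuesday", [(0, none)]), ("Wednesday", [(0, none)]),
    ("Thursday", [(0, none)]), ("Friday", [(0, none)])],
   [("Monday", []), ("Tuesday", []), ("Wednesday", []), ("Thursday", []), ("Friday", [])])

-- ===== CLAIM (what is proved, stated in full; the proofs are below) =====
def Claim_unchanged_generate : Prop := ∀ (number : Int), Dom_generate number → Spec_generate number (generate number)
def Claim_changed_generate : Prop := Dom_generate (pvDiffWitness_generate) ∧ D_generate (pvDiffWitness_generate) ∧ generate (pvDiffWitness_generate) = pvDiffWitnessOut_generate.1 ∧ generate_alt (pvDiffWitness_generate) = pvDiffWitnessOut_generate.2 ∧ pvDiffWitnessOut_generate.1 ≠ pvDiffWitnessOut_generate.2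
def Claim_exact_generate : Prop := ∀ (number : Int), Dom_generate number → D_generate number → generate number ≠ generate_alt number

-- ===== LEMMAS AND PROOFS =====

def pvInnerList (n : Int) : List (Int × Option Int) :=
  (PySem.List.pyRange 0 n 1).map (fun i => (i, (none : Option Int)))

-- A's inner dict-building loop produces exactly the keys 0..n-1 in order
theorem pvInnerEq (n : Int) :
    ((PySem.List.pyRange 0 n 1).foldl (fun td i => td.insert i none) PySem.Dict.empty)
      = PySem.Dict.mk (pvInnerList n) := by
  apply PySem.Dict.ext
  have h := PySem.Dict.items_foldl_insert_fresh (l := PySem.List.pyRange 0 n 1)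
      (k := fun i => i) (v := fun _ => (none : Option Int)) (d := PySem.Dict.empty)
      (by simp) (by simp [PySem.List.nodup_pyRange_one])
  simpa [pvInnerList] using h

-- A's outer loop inserts the five distinct day keys with the same value
theorem pvOuterEq (X : PySem.Dict Int (Option Int)) :
    ((["Monday", "Tuesday", "Wednesday", "Thursday", "Friday"] : List String).foldl
        (fun md day => md.insert day X) PySem.Dict.empty).items
      = (["Monday", "Tuesday", "Wednesday", "Thursday", "Friday"] : List String).map (fun d => (d, X)) := by
  have h := PySem.Dict.items_foldl_insert_fresh
      (l := (["Monday", "Tuesday", "Wednesday", "Thursday", "Friday"] : List String))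
      (k := fun a => a) (v := fun _ => X) (d := PySem.Dict.empty)
      (by simp) (by simp)
  simpa using h

-- B's single loop, fully unfolded over the five enumerated days
theorem pvAltEq (r b : Int) :
    ((PySem.List.enumerate (["Monday", "Tuesday", "Wednesday", "Thursday", "Friday"] : List String)).foldl
        (fun md p =>
          let count := if (p.1 : Int) < r then b + 1 else b
          md.insert p.2 ((PySem.List.pyRange 0 count 1).map (fun i => (i, (none : Option Int)))))
        (PySem.Dict.empty : PySem.Dict String (List (Int × Option Int)))).items
      = [("Monday", pvInnerList (if (0:Int) < r then b+1 else b)),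
         ("Tuesday", pvInnerList (if (1:Int) < r then b+1 else b)),
         ("Wednesday", pvInnerList (if (2:Int) < r then b+1 else b)),
         ("Thursday", pvInnerList (if (3:Int) < r then b+1 else b)),
         ("Friday", pvInnerList (if (4:Int) < r then b+1 else b))] := by
  have h := PySem.Dict.items_foldl_insert_fresh
      (l := PySem.List.enumerate (["Monday", "Tuesday", "Wednesday", "Thursday", "Friday"] : List String))
      (k := fun p => p.2)
      (v := fun p => (PySem.List.pyRange 0 (if (p.1 : Int) < r then b + 1 else b) 1).map
        (fun i => (i, (none : Option Int))))
      (d := PySem.Dict.empty)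
      (by simp) (by simp)
  simpa [PySem.List.enumerate, pvInnerList] using h

-- 'i[len(i)] = None' on the dict {0: None, …, b-1: None} appends the fresh key b
theorem pvInsertLen (b : Int) (hb : 0 ≤ b) :
    (PySem.Dict.mk (pvInnerList b)).insert ((PySem.Dict.mk (pvInnerList b)).size : Int) none
      = PySem.Dict.mk (pvInnerList (b + 1)) := by
  have hsize : (((PySem.Dict.mk (pvInnerList b)).size : Nat) : Int) = b := by
    simp [PySem.Dict.size, pvInnerList, PySem.List.length_pyRange_one]
    omega
  have hc : (PySem.Dict.mk (pvInnerList b)).contains b = false := by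
    rw [PySem.Dict.contains_eq_decide_mem_keys]
    simp [PySem.Dict.keys, pvInnerList, PySem.List.mem_pyRange_one]
  rw [hsize]
  apply PySem.Dict.ext
  rw [PySem.Dict.items_insert_of_not_contains _ _ hc]
  simp [pvInnerList, PySem.List.pyRange_one_succ_right hb]

theorem pvTdivNeg (n : Int) (hn : n < 0) : n.tdiv 5 = -((-n) / 5) := by
  rw [show n = -(-n) by ring, Int.neg_tdiv, Int.tdiv_eq_ediv_of_nonneg (by omega)]
  simp

-- the patch loop with a negative limit never breaks: it patches every day
theorem pvPatchAll (r : Int) (hr : r < 0) :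
    ∀ (l : List (String × PySem.Dict Int (Option Int))) (c : Int), 0 ≤ c →
      pvPatchLoop r c l = l.map (fun p => (p.1, p.2.insert (p.2.size : Int) none))
  | [], _, _ => by simp [pvPatchLoop]
  | (day, d) :: rest, c, hc => by
      rw [pvPatchLoop, if_neg (by omega)]
      simp [pvPatchAll r hr rest (c + 1) (by omega)]

-- ===== VERDICT (by name: the statement is the Claim_ definition above) =====
theorem generate_spec : Claim_unchanged_generate := by
  intro number _
  unfold Spec_generate
  intro hD
  by_cases h5 : (5 : Int) ∣ number
  · -- limit = 0: no patching, every day has temp_number periods in both programs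
    have hr : number - number.tdiv 5 * 5 = 0 := by rw [Int.tdiv_mul_cancel h5]; ring
    simp only [generate, generate_alt, hr, pvInnerEq, ne_eq, not_true_eq_false, if_false]
    rw [pvOuterEq, pvAltEq]
    norm_num [pvInnerList]
  · have hn : 0 ≤ number := by
      unfold D_generate at hD
      by_contra h; exact hD ⟨by omega, h5⟩
    have he : number.tdiv 5 = number / 5 := Int.tdiv_eq_ediv_of_nonneg hn
    have hb : 0 ≤ number.tdiv 5 := by rw [he]; omega
    have hrb : 1 ≤ number - number.tdiv 5 * 5 ∧ number - number.tdiv 5 * 5 < 5 := by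
      rw [he]; omega
    have h4 : number - number.tdiv 5 * 5 = 1 ∨ number - number.tdiv 5 * 5 = 2 ∨
        number - number.tdiv 5 * 5 = 3 ∨ number - number.tdiv 5 * 5 = 4 := by omega
    rcases h4 with hr | hr | hr | hr <;>
      (simp only [generate, generate_alt, hr, pvInnerEq]
       rw [if_pos (by norm_num), pvOuterEq, pvAltEq]
       norm_num [pvPatchLoop, List.map, pvInsertLen _ hb])
theorem generate_changed : Claim_changed_generate := by
  unfold Claim_changed_generate; decide

theorem generate_tight : Claim_exact_generate := by
  intro number _ hd
  obtain ⟨hneg, hndvd⟩ := hd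
  have he : number.tdiv 5 = -((-number) / 5) := pvTdivNeg number hneg
  have hb : number.tdiv 5 ≤ 0 := by rw [he]; omega
  have hr : number - number.tdiv 5 * 5 < 0 := by rw [he]; omega
  have hr0 : number - number.tdiv 5 * 5 ≠ 0 := by omega
  have hempty : pvInnerList (number.tdiv 5) = [] := by
    simp [pvInnerList, PySem.List.pyRange_one_eq_nil hb]
  simp only [generate, generate_alt, pvInnerEq]
  rw [if_pos hr0, pvOuterEq, pvAltEq, pvPatchAll _ hr _ 0 le_rfl]
  simp only [hempty, List.map]
  have hlt : ∀ i : Int, 0 ≤ i → ¬ (i < number - number.tdiv 5 * 5) := fun i hi => by omega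
  rw [if_neg (hlt 0 (by norm_num)), if_neg (hlt 1 (by norm_num)), if_neg (hlt 2 (by norm_num)),
      if_neg (hlt 3 (by norm_num)), if_neg (hlt 4 (by norm_num))]
  simp only [hempty]
  decide
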